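-- pv_equiv track=rewrite | github.com/SamProkopchuk/coding-problems | google-foobar/Re-ID/solution.py | solution
-- ===== SOURCE A (Python) =====
-- def len_range(start, end, step):
-- 	return (end - start - 1) // step + 1
--
-- def solution(n):
-- 	# Max input (10000) will not search past a prime > 2^15
-- 	size = 1 << 15
-- 	primeIdx = [False] * 2 + [True] * (size-2)
--
-- 	res = ''
-- 	# pstringIdx keeps track of index in "concatenated string of primes"
-- 	pstringIdx = 0
-- 	for seive in range(2, size):
-- 		if not primeIdx[seive]: continue
-- 		# Seive will always be the next prime here
-- 		pstringIdx += len(str(seive))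
-- 		if pstringIdx > n:
-- 			res += str(seive)[n - pstringIdx:]
-- 			if len(res) >= 5: break
--
-- 		# Update primeIdx list given next prime seive
-- 		primeIdx[seive*2::seive] = [False] * len_range(seive * 2, size, seive)
-- 	return res[:5]
-- ===== SOURCE B (Python) =====
-- def solution(n):
--     # Trial-division prime generation up to the same fixed bound 1 << 15,
--     # then a single slice of the full concatenation.
--     parts = []
--     for p in range(2, 1 << 15):
--         d = 2
--         while d * d <= p:
--             if p % d == 0:
--                 break
--             d += 1
--         else:
--             parts.append(str(p))
--     return ''.join(parts)[n:n + 5]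
-- ===== Notes on version B (the rewrite author's own statement) =====
-- stated objective: simpler
-- what changed: Replaces the Sieve of Eratosthenes interleaved with incremental pstringIdx offset bookkeeping and an early break by trial-division prime generation over the same fixed range below 32768, followed by one plain slice buffer[n:n+5] of the full concatenation.
-- outside the precondition, e.g. on solution(-3): A returns '23571', B returns ''; on solution(-7): A returns '23571', B returns '19327'
import Mathlib
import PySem

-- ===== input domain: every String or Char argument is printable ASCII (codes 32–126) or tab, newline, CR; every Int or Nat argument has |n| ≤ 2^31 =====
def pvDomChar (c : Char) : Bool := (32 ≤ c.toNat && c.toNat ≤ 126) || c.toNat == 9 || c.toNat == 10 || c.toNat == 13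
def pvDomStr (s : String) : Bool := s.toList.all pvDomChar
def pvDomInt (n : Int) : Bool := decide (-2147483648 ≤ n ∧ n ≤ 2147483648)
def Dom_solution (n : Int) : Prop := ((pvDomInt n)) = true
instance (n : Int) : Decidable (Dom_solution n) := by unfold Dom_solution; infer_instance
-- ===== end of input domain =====

-- B replaces A's sieve-of-Eratosthenes interleaved with incremental offset bookkeeping and an
-- early break by trial-division prime generation followed by one plain slice of the full
-- concatenation (objective: simpler; not faster).

-- ===== PORT A =====
-- Python's extended-slice assignment `primeIdx[seive*2::seive] = [False] * len_range(seive*2, size, seive)`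
-- writes False at exactly the positions seive*2, seive*2+seive, … below len(primeIdx)
-- (the replacement list has exactly the slice's length); ported as this index-walking update.
-- The `0 < s` guard only makes the recursion total; the caller always passes s ≥ 2.
def markMultiples (pi : Array Bool) (s : Nat) (j : Nat) : Array Bool :=
  if h : 0 < s ∧ j < pi.size then markMultiples (pi.set j false h.2) s (j + s)
  else pi
termination_by pi.size - j
decreasing_by simp; omega

-- `for seive in range(2, size)` with `break`, carried state (primeIdx, res, pstringIdx);
-- the loop counter is a nonnegative int, kept as Nat.  `primeIdx[seive]` is an in-range
-- list access (seive < 32768 = len(primeIdx)), ported as getD.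
def sieveLoop (n : Int) (pi : Array Bool) (res : List Char) (ps : Int) (s : Nat) : List Char :=
  if _h : s < 32768 then
    if pi.getD s false = false then sieveLoop n pi res ps (s+1)
    else
      let cs := PySem.Int.toChars (s : Int)          -- str(seive)
      let ps' := ps + (cs.length : Int)              -- pstringIdx += len(str(seive))
      if ps' > n then
        let res' := res ++ PySem.List.slice cs (some (n - ps')) none   -- str(seive)[n - pstringIdx:]
        if 5 ≤ res'.length then res'                 -- break
        else sieveLoop n (markMultiples pi s (s*2)) res' ps' (s+1)
      else sieveLoop n (markMultiples pi s (s*2)) res ps' (s+1)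
  else res

def solution (n : Int) : String :=
  let primeIdx := (List.replicate 2 false ++ List.replicate (32768-2) true).toArray
  String.ofList (PySem.List.slice (sieveLoop n primeIdx [] 0 2) none (some 5))   -- res[:5]

-- ===== PORT B =====
-- the `while d * d <= p: if p % d == 0: break; d += 1 / else:` trial division of Source B;
-- returns true on the `else` (no divisor found); counters are nonnegative ints, kept as Nat
def trialLoop (p : Nat) (d : Nat) : Bool :=
  if _h : d * d ≤ p then
    if p % d = 0 then false else trialLoop p (d+1)
  else true
termination_by p + 1 - d
decreasing_by
  rcases Nat.eq_zero_or_pos d with h0 | h0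
  · omega
  · have hd : d ≤ d * d := Nat.le_mul_of_pos_left d h0
    omega

def solution_alt (n : Int) : String :=
  let parts := (PySem.List.pyRange 2 32768 1).foldl
    (fun acc p => if trialLoop p.toNat 2 then acc ++ [PySem.Int.toChars p] else acc) []
  String.ofList (PySem.List.slice parts.flatten (some n) (some (n+5)))   -- ''.join(parts)[n:n+5]

-- ===== PRECONDITION & SPEC =====
-- Pre_ excludes negative offsets, an unspecified corner: A's negative slice arithmetic happens
-- to yield the offset-0 answer there, while B's plain Python slice indexes from the buffer's end.
def Pre_solution (n : Int) : Prop := 0 ≤ n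
instance (n : Int) : Decidable (Pre_solution n) := by unfold Pre_solution; infer_instance
def pvWitness_solution : Int := 0
def Spec_solution (n : Int) (out : String) : Prop := out = solution_alt n
instance (n : Int) (out : String) : Decidable (Spec_solution n out) := by unfold Spec_solution; infer_instance

-- ===== CLAIM (what is proved, stated in full; the proofs are below) =====
def Claim_equal_solution : Prop := ∀ (n : Int), Dom_solution n → Pre_solution n → Spec_solution n (solution n)

-- ===== LEMMAS AND PROOFS =====

-- str(k) of a nonnegative int is nonempty
theorem toDigitsCore_len_le (b : Nat) : ∀ (fuel n : Nat) (acc : List Char),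
    acc.length ≤ (Nat.toDigitsCore b fuel n acc).length := by
  intro fuel
  induction fuel with
  | zero => intro n acc; simp [Nat.toDigitsCore]
  | succ f ih =>
    intro n acc
    simp only [Nat.toDigitsCore]
    split
    · simp
    · exact le_trans (by simp) (ih _ _)

theorem toChars_ne_nil (s : Nat) : PySem.Int.toChars (s : Int) ≠ [] := by
  have h2 : ¬ ((s : Int) < 0) := by omega
  simp only [PySem.Int.toChars, if_neg h2, Nat.toDigits]
  have := toDigitsCore_len_le 10 ((s:Int).toNat) ((s:Int).toNat / 10) []
  simp only [Nat.toDigitsCore]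
  split
  · simp
  · intro hc
    have h1 : (1 : Nat) ≤ 0 := by
      calc (1:Nat) = ([(((s:Int).toNat % 10).digitChar)] : List Char).length := rfl
        _ ≤ _ := toDigitsCore_len_le 10 _ _ _
        _ = ([] : List Char).length := by rw [hc]
        _ = 0 := rfl
    omega

-- the concatenation of str(p) over the primes p in [s, 32768)
def buf (s : Nat) : List Char :=
  ((List.range' s (32768 - s)).filter (fun p => decide (Nat.Prime p))).flatMap
    (fun p : Nat => PySem.Int.toChars (p : Int))

theorem buf_ge (s : Nat) (h : 32768 ≤ s) : buf s = [] := by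
  simp [buf, Nat.sub_eq_zero_of_le h]

theorem buf_succ (s : Nat) (h : s < 32768) :
    buf s = (if Nat.Prime s then PySem.Int.toChars (s : Int) else []) ++ buf (s+1) := by
  have : 32768 - s = (32768 - (s+1)) + 1 := by omega
  rw [buf, this, List.range'_succ]
  by_cases hp : Nat.Prime s <;> simp [hp, buf]

-- sieve invariant: entry k is still true iff no prime < s divides k properly
def SieveInv (pi : Array Bool) (s : Nat) : Prop :=
  pi.size = 32768 ∧ ∀ k, k < 32768 →
    (pi.getD k false = true ↔ (2 ≤ k ∧ ∀ q, Nat.Prime q → q < s → q ∣ k → q = k))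

theorem getD_toArray (l : List Bool) (k : Nat) (d : Bool) : (l.toArray).getD k d = l.getD k d := by
  simp [Array.getD, List.getD, Array.getInternal]
  split
  · rename_i h; simp [List.getElem?_eq_getElem h]
  · rename_i h; simp [List.getElem?_eq_none (by omega : l.length ≤ k)]

theorem getD_set (a : Array Bool) (j k : Nat) (v : Bool) (h : j < a.size) :
    (a.set j v h).getD k false = if k = j then (if k < a.size then v else false) else a.getD k false := by
  by_cases hk : k < a.size
  · simp [Array.getD, hk, Array.getInternal]
    split <;> simp_all [List.getElem_set]
    omega
  · simp [Array.getD, hk]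

theorem inv_init : SieveInv (List.replicate 2 false ++ List.replicate (32768-2) true).toArray 2 := by
  constructor
  · rw [List.size_toArray, List.length_append, List.length_replicate, List.length_replicate]
  · intro k hk
    have hq : ∀ q, Nat.Prime q → q < 2 → q ∣ k → q = k := by
      intro q hqp hq2 _
      exact absurd hqp.two_le (by omega)
    rw [getD_toArray, List.getD_eq_getElem?_getD]
    by_cases h2 : k < 2
    · rw [List.getElem?_append_left (by simpa using (by omega : k < 2))]
      rw [List.getElem?_replicate, if_pos h2]
      constructor
      · intro hf; simp at hf
      · rintro ⟨hc, _⟩; omega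
    · rw [List.getElem?_append_right (by simpa using (by omega : 2 ≤ k))]
      rw [List.getElem?_replicate]
      have hlt : k - (List.replicate 2 false).length < 32768 - 2 := by
        rw [List.length_replicate]; omega
      rw [if_pos hlt]
      exact ⟨fun _ => ⟨by omega, fun q hqp hl hd => hq q hqp (by omega) hd⟩, fun _ => rfl⟩

theorem markMultiples_size (pi : Array Bool) (s j : Nat) :
    (markMultiples pi s j).size = pi.size := by
  fun_induction markMultiples <;> simp_all

theorem markMultiples_getD (pi : Array Bool) (s j k : Nat) (hs : 0 < s) :
    (markMultiples pi s j).getD k false =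
      if j ≤ k ∧ k < pi.size ∧ (k - j) % s = 0 then false else pi.getD k false := by
  fun_induction markMultiples pi s j with
  | case1 pi j h ih =>
    rw [ih, getD_set]
    simp only [Array.size_set]
    have hdvd1 : (j ≤ k ∧ k < pi.size ∧ (k - j) % s = 0) ↔
        (k = j ∧ k < pi.size) ∨ (j + s ≤ k ∧ k < pi.size ∧ (k - (j + s)) % s = 0) := by
      constructor
      · rintro ⟨h1, h2, h3⟩
        by_cases hkj : k = j
        · exact Or.inl ⟨hkj, h2⟩
        · right
          have hd : s ∣ (k - j) := Nat.dvd_iff_mod_eq_zero.mpr h3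
          have hge : s ≤ k - j := Nat.le_of_dvd (by omega) hd
          refine ⟨by omega, h2, ?_⟩
          have heq : k - (j + s) = (k - j) - s := by omega
          rw [heq]
          exact Nat.dvd_iff_mod_eq_zero.mp (Nat.dvd_sub hd dvd_rfl)
      · rintro (⟨h1, h2⟩ | ⟨h1, h2, h3⟩)
        · subst h1; simp [h2]
        · have hd : s ∣ (k - (j + s)) := Nat.dvd_iff_mod_eq_zero.mpr h3
          refine ⟨by omega, h2, ?_⟩
          have heq : k - j = (k - (j + s)) + s := by omega
          rw [heq]
          exact Nat.dvd_iff_mod_eq_zero.mp (Nat.dvd_add hd dvd_rfl)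
    by_cases hkj : k = j
    · subst hkj
      have hns : ¬ (k + s ≤ k) := by omega
      simp [hns, h.2]
    · have hne : ¬ (k = j ∧ k < pi.size) := by simp [hkj]
      by_cases hc2 : j + s ≤ k ∧ k < pi.size ∧ (k - (j + s)) % s = 0
      · simp [hc2, hdvd1.mpr (Or.inr hc2)]
      · have hnc : ¬ (j ≤ k ∧ k < pi.size ∧ (k - j) % s = 0) := by
          intro hcc; rcases hdvd1.mp hcc with h' | h' <;> [exact hne h'; exact hc2 h']
        simp [hc2, hkj, hnc]
  | case2 pi j h =>
    have hnc : ¬ (j ≤ k ∧ k < pi.size ∧ (k - j) % s = 0) := by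
      intro hcc; exact h ⟨hs, by omega⟩
    simp [hnc]

theorem inv_read (pi : Array Bool) (s : Nat) (h : SieveInv pi s) (hs2 : 2 ≤ s) (hs : s < 32768) :
    pi.getD s false = decide (Nat.Prime s) := by
  rcases h with ⟨hsz, hinv⟩
  by_cases hp : Nat.Prime s
  · simp only [hp, decide_true]
    exact (hinv s hs).mpr ⟨hs2, fun q hq _ hdvd => by
      rcases hp.eq_one_or_self_of_dvd q hdvd with h1 | h1
      · exact absurd hq.two_le (by omega)
      · exact h1⟩
  · simp only [hp, decide_false]
    cases hb : pi.getD s false with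
    | false => rfl
    | true =>
      exfalso
      have hq := ((hinv s hs).mp hb).2
      have hmf : s.minFac < s := by
        have hle : s.minFac ≤ s := Nat.minFac_le (by omega)
        rcases Nat.lt_or_ge s.minFac s with h1 | h1
        · exact h1
        · exact absurd (Nat.prime_def_minFac.mpr ⟨hs2, by omega⟩) hp
      exact hp (Nat.prime_def_minFac.mpr ⟨hs2,
        hq s.minFac (Nat.minFac_prime (by omega)) hmf (Nat.minFac_dvd s)⟩)

theorem inv_step_comp (pi : Array Bool) (s : Nat) (h : SieveInv pi s) (hnp : ¬ Nat.Prime s) :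
    SieveInv pi (s+1) := by
  refine ⟨h.1, fun k hk => ?_⟩
  rw [h.2 k hk]
  constructor
  · rintro ⟨h2, hq⟩
    refine ⟨h2, fun q hqp hlt hdvd => ?_⟩
    rcases Nat.lt_or_ge q s with h1 | h1
    · exact hq q hqp h1 hdvd
    · have hqs : q = s := by omega
      subst hqs
      exact absurd hqp hnp
  · rintro ⟨h2, hq⟩
    exact ⟨h2, fun q hqp hlt hdvd => hq q hqp (by omega) hdvd⟩

theorem inv_step_prime (pi : Array Bool) (s : Nat) (hs2 : 2 ≤ s) (h : SieveInv pi s) (hp : Nat.Prime s) :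
    SieveInv (markMultiples pi s (s*2)) (s+1) := by
  have hsz := h.1
  refine ⟨by rw [markMultiples_size, hsz], fun k hk => ?_⟩
  rw [markMultiples_getD pi s (s*2) k (by omega), hsz]
  by_cases hc : s*2 ≤ k ∧ k < 32768 ∧ (k - s*2) % s = 0
  · simp only [hc]
    have hdvd : s ∣ k := by
      have h1 : s ∣ (k - s*2) := Nat.dvd_iff_mod_eq_zero.mpr hc.2.2
      have h2 : k = (k - s*2) + s*2 := by omega
      rw [h2]; exact Nat.dvd_add h1 ⟨2, rfl⟩
    constructor
    · intro hfalse; exact absurd hfalse (by simp)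
    · rintro ⟨h2, hq⟩
      have := hq s hp (by omega) hdvd
      omega
  · simp only [hc, if_false]
    rw [h.2 k hk]
    constructor
    · rintro ⟨h2, hq⟩
      refine ⟨h2, fun q hqp hlt hdvd => ?_⟩
      rcases Nat.lt_or_ge q s with h1 | h1
      · exact hq q hqp h1 hdvd
      · have hqs : q = s := by omega
        subst hqs
        by_contra hne
        rcases hdvd with ⟨c, hkc⟩
        have hc2 : 2 ≤ c := by
          rcases Nat.lt_or_ge c 2 with hlt2 | hge2
          · interval_cases c <;> omega
          · exact hge2
        have hk2s : q*2 ≤ k := by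
          rw [hkc]; exact Nat.mul_le_mul_left q hc2
        have hd2 : q ∣ (k - q*2) := Nat.dvd_sub ⟨c, hkc⟩ ⟨2, rfl⟩
        exact hc ⟨hk2s, hk, Nat.dvd_iff_mod_eq_zero.mp hd2⟩
    · rintro ⟨h2, hq⟩
      exact ⟨h2, fun q hqp hlt hdvd => hq q hqp (by omega) hdvd⟩

theorem toChars_len_pos (s : Nat) : 0 < (PySem.Int.toChars (s : Int)).length :=
  List.length_pos_of_ne_nil (toChars_ne_nil s)

theorem clampIdx_shift (L : Nat) (n ps : Int) (hgt : n < ps + L) :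
    PySem.List.clampIdx L (n - (ps + L)) = (n - ps).toNat := by
  unfold PySem.List.clampIdx
  split_ifs <;> omega

theorem loop_eq (n : Int) :
    ∀ (m s : Nat) (pi : Array Bool) (res : List Char) (ps : Int),
    32768 - s ≤ m → 2 ≤ s → SieveInv pi s →
    ((res = [] ∧ ps ≤ n) ∨ (ps = n + res.length ∧ res.length < 5)) →
    (sieveLoop n pi res ps s).take 5 = (res ++ (buf s).drop (n - ps).toNat).take 5 := by
  intro m
  induction m with
  | zero =>
    intro s pi res ps hm hs2 hinv hdisj
    have hge : ¬ (s < 32768) := by omega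
    rw [sieveLoop, dif_neg hge, buf_ge s (by omega)]
    simp
  | succ m ih =>
    intro s pi res ps hm hs2 hinv hdisj
    by_cases hs : s < 32768
    · rw [sieveLoop, dif_pos hs]
      have hread := inv_read pi s hinv hs2 hs
      by_cases hp : Nat.Prime s
      · rw [hread]
        simp only [hp, decide_true, Bool.true_eq_false, if_false]
        have hbufs : buf s = PySem.Int.toChars (s : Int) ++ buf (s+1) := by
          rw [buf_succ s hs, if_pos hp]
        set cs := PySem.Int.toChars (s : Int) with hcs
        have hL : 0 < cs.length := toChars_len_pos s
        by_cases hgt : ps + (cs.length : Int) > n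
        · have hslice : PySem.List.slice cs (some (n - (ps + (cs.length : Int)))) none
              = cs.drop (n - ps).toNat := by
            rw [PySem.List.slice_some_none, clampIdx_shift cs.length n ps (by omega)]
          rw [if_pos hgt, hslice]
          have hdrop : (buf s).drop (n - ps).toNat
              = cs.drop (n - ps).toNat ++ (buf (s+1)).drop (n - (ps + (cs.length : Int))).toNat := by
            rw [hbufs, List.drop_append]
            congr 1
            have : (n - ps).toNat - cs.length = (n - (ps + (cs.length : Int))).toNat := by omega
            rw [this]
          by_cases hbrk : 5 ≤ (res ++ cs.drop (n - ps).toNat).length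
          · rw [if_pos hbrk, hdrop, ← List.append_assoc,
              List.take_append_of_le_length hbrk]
          · rw [if_neg hbrk]
            have hlen : ((res ++ cs.drop (n - ps).toNat).length : Int)
                = res.length + cs.length - (n - ps).toNat := by
              have ht : (n - ps).toNat ≤ cs.length := by
                rcases hdisj with ⟨hres, hps⟩ | ⟨hps, _⟩
                · omega
                · omega
              simp [List.length_drop]
              omega
            have hinv' : ps + (cs.length : Int)
                = n + ((res ++ cs.drop (n - ps).toNat).length : Int) := by
              rcases hdisj with ⟨hres, hps⟩ | ⟨hps, _⟩
              · subst hres; simp at hlen ⊢; omega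
              · omega
            have := ih (s+1) (markMultiples pi s (s*2)) (res ++ cs.drop (n - ps).toNat)
              (ps + (cs.length : Int)) (by omega) (by omega)
              (inv_step_prime pi s hs2 hinv hp)
              (Or.inr ⟨hinv', by omega⟩)
            rw [this, hdrop, ← List.append_assoc]
        · rw [if_neg hgt]
          have hres : res = [] ∧ ps ≤ n := by
            rcases hdisj with h | ⟨hps, _⟩
            · exact h
            · exfalso; omega
          rcases hres with ⟨hres, hps⟩
          subst hres
          have hdropcs : cs.drop (n - ps).toNat = [] :=
            List.drop_eq_nil_of_le (by omega)
          have hdrop : (buf s).drop (n - ps).toNat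
              = (buf (s+1)).drop (n - (ps + (cs.length : Int))).toNat := by
            rw [hbufs, List.drop_append, hdropcs, List.nil_append]
            congr 1
            omega
          have := ih (s+1) (markMultiples pi s (s*2)) [] (ps + (cs.length : Int))
            (by omega) (by omega) (inv_step_prime pi s hs2 hinv hp)
            (Or.inl ⟨rfl, by omega⟩)
          rw [this, hdrop]
      · rw [hread]
        simp only [hp, decide_false, if_pos]
        have hbufs : buf s = buf (s+1) := by
          rw [buf_succ s hs, if_neg hp, List.nil_append]
        rw [hbufs]
        exact ih (s+1) pi res ps (by omega) (by omega) (inv_step_comp pi s hinv hp) hdisj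
    · rw [sieveLoop, dif_neg hs, buf_ge s (by omega)]
      simp

theorem trial_iff : ∀ (m d p : Nat), 2 ≤ d → p + 1 - d ≤ m →
    (trialLoop p d = true ↔ ∀ e, d ≤ e → e * e ≤ p → p % e ≠ 0) := by
  intro m
  induction m with
  | zero =>
    intro d p hd hm
    rw [trialLoop]
    have hnd : ¬ (d * d ≤ p) := by
      intro hc
      have : d ≤ d * d := Nat.le_mul_of_pos_left d (by omega)
      omega
    simp only [hnd, dif_neg, not_false_iff]
    constructor
    · intro _ e he hee
      exfalso
      have : d * d ≤ e * e := Nat.mul_le_mul he he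
      omega
    · intro _; trivial
  | succ m ih =>
    intro d p hd hm
    rw [trialLoop]
    by_cases hdd : d * d ≤ p
    · simp only [hdd, dif_pos]
      by_cases hmod : p % d = 0
      · simp only [hmod, if_pos]
        constructor
        · intro hf; simp at hf
        · intro hcon
          exact absurd hmod (hcon d le_rfl hdd)
      · simp only [hmod, if_neg, not_false_iff]
        rw [ih (d+1) p (by omega) (by
          have : d ≤ d * d := Nat.le_mul_of_pos_left d (by omega)
          omega)]
        constructor
        · intro hall e he hee
          rcases Nat.eq_or_lt_of_le he with rfl | hlt
          · exact hmod
          · exact hall e hlt hee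
        · intro hall e he hee
          exact hall e (by omega) hee
    · simp only [hdd, dif_neg, not_false_iff]
      constructor
      · intro _ e he hee
        exfalso
        have : d * d ≤ e * e := Nat.mul_le_mul he he
        omega
      · intro _; trivial

theorem trial_eq_prime (p : Nat) (hp : 2 ≤ p) : trialLoop p 2 = decide (Nat.Prime p) := by
  have hiff := trial_iff (p + 1) 2 p le_rfl (by omega)
  have hprime : Nat.Prime p ↔ ∀ e, 2 ≤ e → e * e ≤ p → p % e ≠ 0 := by
    rw [Nat.prime_def_le_sqrt]
    constructor
    · rintro ⟨_, hall⟩ e he hee hmod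
      exact hall e he (Nat.le_sqrt.mpr hee) ((Nat.dvd_iff_mod_eq_zero).mpr hmod)
    · intro hall
      refine ⟨hp, fun m hm hms hdvd => ?_⟩
      exact hall m hm (Nat.le_sqrt.mp hms) (Nat.dvd_iff_mod_eq_zero.mp hdvd)
  by_cases hpr : Nat.Prime p
  · simp only [hpr, decide_true]
    exact hiff.mpr (hprime.mp hpr)
  · simp only [hpr, decide_false]
    cases hb : trialLoop p 2 with
    | false => rfl
    | true => exact absurd (hprime.mpr (hiff.mp hb)) hpr

theorem A_closed (n : Int) (hn : 0 ≤ n) :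
    solution n = String.ofList (((buf 2).drop n.toNat).take 5) := by
  simp only [solution]
  rw [PySem.List.slice_to _ (by omega : (0:Int) ≤ 5)]
  congr 1
  have hl := loop_eq n 32768 2
    ((List.replicate 2 false ++ List.replicate (32768-2) true).toArray) [] 0
    (by omega) le_rfl inv_init (Or.inl ⟨rfl, hn⟩)
  rw [show ((5:Int)).toNat = 5 from rfl, hl, List.nil_append,
    show n - 0 = n from by ring]

theorem B_closed (n : Int) (hn : 0 ≤ n) :
    solution_alt n = String.ofList (((buf 2).drop n.toNat).take 5) := by
  simp only [solution_alt]
  congr 1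
  rw [PySem.List.pyRange_of_pos 2 32768 (by norm_num)]
  rw [(by decide : (if (2:Int) < 32768 then ((32768 - 2 + 1 - 1 : Int) / 1).toNat else 0) = 32766)]
  rw [List.foldl_map, PySem.List.foldl_append_if
    (fun k : Nat => trialLoop ((2 + 1 * (k:Int))).toNat 2)
    (fun k : Nat => PySem.Int.toChars (2 + 1 * (k:Int)))]
  rw [List.nil_append, ← List.flatMap_def]
  rw [PySem.List.slice_toNat _ hn (by omega : (0:Int) ≤ n + 5)]
  rw [show (n+5).toNat - n.toNat = 5 from by omega]
  refine congrArg (List.take 5) (congrArg (List.drop n.toNat) ?_)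
  unfold buf
  rw [show (32768 - 2 : Nat) = 32766 from by norm_num]
  rw [List.range'_eq_map_range, List.filter_map, List.flatMap_map]
  have hp : (fun k : Nat => trialLoop ((2 + 1 * (k:Int))).toNat 2)
      = (fun k : Nat => (fun p : Nat => decide (Nat.Prime p)) ((fun x : Nat => 2 + x) k)) := by
    funext k
    show trialLoop ((2 + 1 * (k:Int))).toNat 2 = decide (Nat.Prime (2 + k))
    rw [show ((2:Int) + 1 * k).toNat = 2 + k from by omega,
      trial_eq_prime (2+k) (by omega)]
  have hf : (fun k : Nat => PySem.Int.toChars (2 + 1 * (k:Int)))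
      = (fun k : Nat => (fun p : Nat => PySem.Int.toChars (p : Int)) ((fun x : Nat => 2 + x) k)) := by
    funext k
    show PySem.Int.toChars (2 + 1 * (k:Int)) = PySem.Int.toChars (((2 + k : Nat) : Int))
    norm_num
  rw [hp, hf]
  rfl

-- ===== VERDICT (by name: the statement is the Claim_ definition above) =====
theorem solution_spec : Claim_equal_solution := by
  intro n _ hpre
  unfold Spec_solution
  rw [A_closed n hpre, B_closed n hpre]
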